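-- pv_equiv track=rewrite | github.com/ellepannitto/LISA | FeatureSelector.py | index_generalizzato_prefisso
-- ===== SOURCE A (Python) =====
-- def index_generalizzato_prefisso ( lista, valori ):
-- 	'''
-- 	 cerca dentro una lista una stringa che hanno come prefisso alcuni valori e restituisce una lista di indici trovati
-- 	 lista: [AZZZ,BZZZ,CZZZ,DZZZ] valori: [A,C]
-- 	 valore restituito: [0,2]
-- 	'''
--
-- 	ret = []
--
-- 	for pref in valori:
--
-- 		for i in  range (len (lista)):
-- 			el = lista[i]
-- 			if el[0:len(pref)] == pref:
-- 				ret.append (i)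
--
-- 	return ret
-- ===== SOURCE B (Python) =====
-- def index_generalizzato_prefisso(lista, valori):
--     # single pass over lista: one bucket of matching indices per prefix, concatenated at the end
--     buckets = [[] for _ in valori]
--     for i, el in enumerate(lista):
--         for bucket, pref in zip(buckets, valori):
--             if el.startswith(pref):
--                 bucket.append(i)
--     ret = []
--     for bucket in buckets:
--         ret.extend(bucket)
--     return ret
-- ===== Notes on version B (the rewrite author's own statement) =====
-- stated objective: alternative
-- what changed: Inverted the loop nesting: one pass over lista maintains a bucket of matching indices per prefix (using str.startswith instead of a slice comparison), and the buckets are concatenated in valori order, instead of re-scanning lista once per prefix.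
import Mathlib
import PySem

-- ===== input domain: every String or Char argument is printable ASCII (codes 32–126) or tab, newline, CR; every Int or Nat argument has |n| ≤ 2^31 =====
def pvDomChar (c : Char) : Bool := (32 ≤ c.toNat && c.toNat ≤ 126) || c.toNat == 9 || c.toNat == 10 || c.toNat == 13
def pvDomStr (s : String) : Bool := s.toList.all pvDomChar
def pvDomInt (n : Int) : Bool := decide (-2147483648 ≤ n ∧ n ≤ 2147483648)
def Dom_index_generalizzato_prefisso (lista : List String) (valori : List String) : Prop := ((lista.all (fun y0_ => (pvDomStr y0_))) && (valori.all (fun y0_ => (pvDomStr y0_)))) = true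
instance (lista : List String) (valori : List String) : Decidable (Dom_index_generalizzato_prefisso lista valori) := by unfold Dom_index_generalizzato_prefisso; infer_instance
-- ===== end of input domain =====

-- B inverts the loop nesting: one pass over lista maintaining a bucket of indices per prefix,
-- concatenated in valori order, instead of re-scanning lista once per prefix (objective: alternative).


-- ===== PORT A =====
-- for pref in valori: for i in range(len(lista)): el = lista[i]; if el[0:len(pref)] == pref: ret.append(i)
def index_generalizzato_prefisso (lista : List String) (valori : List String) : List Int :=
  valori.foldl (fun ret pref =>
    (PySem.List.pyRange 0 (PySem.List.len lista) 1).foldl (fun ret i =>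
      let el := PySem.List.pyGetD lista i ""
      if PySem.Str.slice el (some 0) (some (PySem.Str.len pref)) == pref then ret ++ [i] else ret)
      ret) []

-- ===== PORT B =====
-- buckets = [[] for _ in valori]; for i, el in enumerate(lista): buckets = [b + [i] if el.startswith(pref) else b for b, pref in zip(buckets, valori)]; return concat
def index_generalizzato_prefisso_alt (lista : List String) (valori : List String) : List Int :=
  let buckets0 : List (List Int) := valori.map (fun _ => [])
  let buckets := (PySem.List.enumerate lista 0).foldl
    (fun buckets p =>
      (buckets.zip valori).map (fun q => if PySem.Str.startswith p.2 q.2 then q.1 ++ [p.1] else q.1))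
    buckets0
  buckets.flatten

-- ===== PRECONDITION & SPEC =====
def Spec_index_generalizzato_prefisso (lista : List String) (valori : List String) (out : List Int) : Prop := out = index_generalizzato_prefisso_alt lista valori
instance (lista : List String) (valori : List String) (out : List Int) : Decidable (Spec_index_generalizzato_prefisso lista valori out) := by unfold Spec_index_generalizzato_prefisso; infer_instance

-- ===== CLAIM (what is proved, stated in full; the proofs are below) =====
def Claim_equal_index_generalizzato_prefisso : Prop := ∀ (lista : List String) (valori : List String), Dom_index_generalizzato_prefisso lista valori → Spec_index_generalizzato_prefisso lista valori (index_generalizzato_prefisso lista valori)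

-- ===== LEMMAS AND PROOFS =====

-- A's slice comparison el[0:len(pref)] == pref is exactly el.startswith(pref)
lemma pv_cond_eq (el pref : String) :
    (PySem.Str.slice el (some 0) (some (PySem.Str.len pref)) == pref) = PySem.Str.startswith el pref := by
  have h : (PySem.Str.slice el (some 0) (some (PySem.Str.len pref))).toList = el.toList.take pref.toList.length := by
    simp [pysem, PySem.List.slice_to]
  rw [Bool.eq_iff_iff, beq_iff_eq, ← String.toList_inj, h]
  simp [PySem.Chars.startswith_iff, List.prefix_iff_eq_take]
  exact comm

-- the matching indices of lista for one prefix, as a filter of enumerate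
def pvMatches (lista : List String) (pref : String) : List Int :=
  ((PySem.List.enumerate lista 0).filter (fun p => PySem.Str.startswith p.2 pref)).map (·.1)

lemma pv_A_eq (lista valori : List String) :
    index_generalizzato_prefisso lista valori = valori.flatMap (pvMatches lista) := by
  unfold index_generalizzato_prefisso
  have hinner : ∀ (pref : String) (ret : List Int),
      (PySem.List.pyRange 0 (PySem.List.len lista) 1).foldl (fun ret i =>
        let el := PySem.List.pyGetD lista i ""
        if PySem.Str.slice el (some 0) (some (PySem.Str.len pref)) == pref then ret ++ [i] else ret)
        ret = ret ++ pvMatches lista pref := by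
    intro pref ret
    simp only [pv_cond_eq]
    rw [show ret ++ pvMatches lista pref
        = (PySem.List.enumerate lista 0).foldl
            (fun acc (p : Int × String) => if PySem.Str.startswith p.2 pref then acc ++ [p.1] else acc) ret from
      (PySem.List.foldl_append_if _ _ _ ret).symm]
    rw [PySem.List.enumerate_eq_map_pyRange lista "", List.foldl_map]
  have houter : (fun (ret : List Int) pref =>
      (PySem.List.pyRange 0 (PySem.List.len lista) 1).foldl (fun ret i =>
        let el := PySem.List.pyGetD lista i ""
        if PySem.Str.slice el (some 0) (some (PySem.Str.len pref)) == pref then ret ++ [i] else ret)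
        ret) = fun ret pref => ret ++ pvMatches lista pref := by
    funext ret pref; exact hinner pref ret
  rw [houter, PySem.List.foldl_append_eq_flatMap]
  simp

lemma pv_zip_self {A B : Type} (f : A → B) (l : List A) :
    (l.map f).zip l = l.map (fun v => (f v, v)) := by
  induction l with
  | nil => rfl
  | cons a t iht => simp [iht]

lemma pv_buckets (l : List String) (s : Int) (valori : List String) (f : String → List Int) :
    (PySem.List.enumerate l s).foldl
      (fun buckets p =>
        (buckets.zip valori).map (fun q => if PySem.Str.startswith p.2 q.2 then q.1 ++ [p.1] else q.1))
      (valori.map f)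
    = valori.map (fun pref =>
        f pref ++ ((PySem.List.enumerate l s).filter (fun p => PySem.Str.startswith p.2 pref)).map (·.1)) := by
  induction l generalizing s f with
  | nil => simp [PySem.List.enumerate_nil]
  | cons x xs ih =>
    rw [PySem.List.enumerate_cons, List.foldl_cons]
    have hz := pv_zip_self f valori
    rw [show ((valori.map f).zip valori).map
          (fun q => if PySem.Str.startswith x q.2 then q.1 ++ [s] else q.1)
        = valori.map (fun v => if PySem.Str.startswith x v then f v ++ [s] else f v) from by
      rw [hz, List.map_map]; rfl]
    rw [ih (s+1) (fun v => if PySem.Str.startswith x v then f v ++ [s] else f v)]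
    apply List.map_congr_left
    intro pref _
    simp only [List.filter_cons]
    by_cases h : PySem.Chars.startswith x.toList pref.toList <;> simp [h]

lemma pv_B_eq (lista valori : List String) :
    index_generalizzato_prefisso_alt lista valori = valori.flatMap (pvMatches lista) := by
  rw [show index_generalizzato_prefisso_alt lista valori
      = ((PySem.List.enumerate lista 0).foldl
          (fun buckets p =>
            (buckets.zip valori).map (fun q => if PySem.Str.startswith p.2 q.2 then q.1 ++ [p.1] else q.1))
          (valori.map (fun _ => ([] : List Int)))).flatten from rfl]
  rw [pv_buckets lista 0 valori (fun _ => [])]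
  rw [List.flatMap_def]
  simp only [List.nil_append]
  apply congrArg
  apply List.map_congr_left
  intro pref _
  simp [pvMatches]

-- ===== VERDICT (by name: the statement is the Claim_ definition above) =====
theorem index_generalizzato_prefisso_spec : Claim_equal_index_generalizzato_prefisso := by
  intro lista valori _
  unfold Spec_index_generalizzato_prefisso
  rw [pv_A_eq, pv_B_eq]
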